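-- pv_equiv track=rewrite | github.com/marcoheisig/cl4py | cl4py/data.py | python_name
-- ===== SOURCE A (Python) =====
-- python_name_translations = {
--     '+'  : 'add',
--     '*'  : 'mul',
--     '-'  : 'sub',
--     '/'  : 'div',
--     '1+'  : 'inc',
--     '1-'  : 'dec',
-- }
--
-- python_name_substitutions = {
--     '-'  : '_',
--     '*'  : 'O',
--     '+'  : 'X',
--     '<=' : 'le',
--     '<'  : 'lt',
--     '/=' : 'ne',
--     '>=' : 'ge',
--     '>'  : 'gt',
--     '='  : 'sim',
--     '~'  : 'tilde',
-- }
--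
-- def python_name(name: str):
--     # Use explicit translations for certain names.
--     if name in python_name_translations:
--         return python_name_translations[name]
--     else:
--         # Strip earmuffs.
--         if ((len(name) > 2) and
--             (name[0] in '*+') and
--             (name[0] == name[-1]) and
--             (name[0] != name[1])): # Don't strip earmuffs off *** or +++
--             name = name[1:-1]
--         # Substitute problematic characters.
--         for (old, new) in python_name_substitutions.items():
--             name = name.replace(old, new)
--         return name.lower()
-- ===== SOURCE B (Python) =====
-- python_name_translations = {
--     '+'  : 'add',
--     '*'  : 'mul',
--     '-'  : 'sub',
--     '/'  : 'div',
--     '1+'  : 'inc',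
--     '1-'  : 'dec',
-- }
--
-- # Two-character substitution keys, tried first (longest match wins).
-- _two_char_subs = {'<=': 'le', '/=': 'ne', '>=': 'ge'}
-- _one_char_subs = {'-': '_', '*': 'O', '+': 'X', '<': 'lt', '>': 'gt', '=': 'sim', '~': 'tilde'}
--
-- def python_name(name: str):
--     # Use explicit translations for certain names.
--     if name in python_name_translations:
--         return python_name_translations[name]
--     # Strip earmuffs (but not off *** or +++).
--     if ((len(name) > 2) and
--         (name[0] in '*+') and
--         (name[0] == name[-1]) and
--         (name[0] != name[1])):
--         name = name[1:-1]
--     # Single left-to-right scan, preferring two-character keys.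
--     out = []
--     i = 0
--     while i < len(name):
--         pair = name[i:i+2]
--         if pair in _two_char_subs:
--             out.append(_two_char_subs[pair])
--             i += 2
--         else:
--             c = name[i]
--             out.append(_one_char_subs.get(c, c))
--             i += 1
--     return ''.join(out).lower()
-- ===== Notes on version B (the rewrite author's own statement) =====
-- stated objective: alternative
-- what changed: Replaced the ten sequential whole-string str.replace passes with a single left-to-right scan that substitutes tokens in one pass, trying the two-character keys ('<=', '/=', '>=') before the one-character keys; the translations fast path and earmuff-stripping guard are unchanged.
import Mathlib
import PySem

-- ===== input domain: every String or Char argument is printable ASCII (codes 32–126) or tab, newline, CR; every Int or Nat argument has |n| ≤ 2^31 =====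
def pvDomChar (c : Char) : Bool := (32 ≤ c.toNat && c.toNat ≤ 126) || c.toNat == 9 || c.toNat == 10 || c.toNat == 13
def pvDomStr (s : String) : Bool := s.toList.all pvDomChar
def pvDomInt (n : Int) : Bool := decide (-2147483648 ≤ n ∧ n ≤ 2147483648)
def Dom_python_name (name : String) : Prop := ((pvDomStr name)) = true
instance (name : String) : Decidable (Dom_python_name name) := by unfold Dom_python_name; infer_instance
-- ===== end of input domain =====

-- B replaces A's ten sequential whole-string str.replace passes by a single left-to-right
-- scan with longest-match (two-character keys first) token substitution; objective: alternative.

-- shared module constant: the explicit-translations dict (same literal in Source A and Source B)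
def pvTranslations : PySem.Dict String String :=
  ((((((PySem.Dict.empty).insert "+" "add").insert "*" "mul").insert "-" "sub").insert
      "/" "div").insert "1+" "inc").insert "1-" "dec"

-- shared guard: the earmuff-stripping condition (identical code in Source A and Source B)
def pvEarmuff (cs : List Char) : Bool :=
  decide (2 < cs.length) &&
  PySem.Chars.isIn [PySem.List.pyGetD cs 0 ' '] ['*', '+'] &&
  (PySem.List.pyGetD cs 0 ' ' == PySem.List.pyGetD cs (-1) ' ') &&
  !(PySem.List.pyGetD cs 0 ' ' == PySem.List.pyGetD cs 1 ' ')

-- ===== PORT A =====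
def python_name (name : String) : String :=
  match pvTranslations.get? name with
  | some v => v
  | none =>
    let cs0 := name.toList
    let cs1 := if pvEarmuff cs0 then PySem.List.slice cs0 (some 1) (some (-1)) else cs0
    -- the ten replace passes, in the dict's iteration order
    let c1 := PySem.Chars.replace cs1 ['-'] ['_']
    let c2 := PySem.Chars.replace c1 ['*'] ['O']
    let c3 := PySem.Chars.replace c2 ['+'] ['X']
    let c4 := PySem.Chars.replace c3 ['<', '='] ['l', 'e']
    let c5 := PySem.Chars.replace c4 ['<'] ['l', 't']
    let c6 := PySem.Chars.replace c5 ['/', '='] ['n', 'e']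
    let c7 := PySem.Chars.replace c6 ['>', '='] ['g', 'e']
    let c8 := PySem.Chars.replace c7 ['>'] ['g', 't']
    let c9 := PySem.Chars.replace c8 ['='] ['s', 'i', 'm']
    let c10 := PySem.Chars.replace c9 ['~'] ['t', 'i', 'l', 'd', 'e']
    String.ofList (PySem.Chars.lower c10)

-- ===== PORT B =====
-- Source B's _two_char_subs dict lookup (a literal 3-entry dict) as a chain of tests
def pvSubst2 (a b : Char) : Option (List Char) :=
  if a = '<' ∧ b = '=' then some ['l', 'e']
  else if a = '/' ∧ b = '=' then some ['n', 'e']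
  else if a = '>' ∧ b = '=' then some ['g', 'e']
  else none

-- Source B's _one_char_subs.get(c, c)
def pvSubst1 (a : Char) : List Char :=
  if a = '-' then ['_'] else if a = '*' then ['O'] else if a = '+' then ['X']
  else if a = '<' then ['l', 't'] else if a = '>' then ['g', 't']
  else if a = '=' then ['s', 'i', 'm']
  else if a = '~' then ['t', 'i', 'l', 'd', 'e'] else [a]

-- Source B's while loop: consume two chars on a two-char key match, else one
def pvScan : List Char → List Char
  | [] => []
  | [a] => pvSubst1 a
  | a :: b :: rest =>
    match pvSubst2 a b with
    | some v => v ++ pvScan rest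
    | none => pvSubst1 a ++ pvScan (b :: rest)

def python_name_alt (name : String) : String :=
  match pvTranslations.get? name with
  | some v => v
  | none =>
    let cs0 := name.toList
    let cs1 := if pvEarmuff cs0 then PySem.List.slice cs0 (some 1) (some (-1)) else cs0
    String.ofList (PySem.Chars.lower (pvScan cs1))

-- ===== PRECONDITION & SPEC =====
def Spec_python_name (name : String) (out : String) : Prop := out = python_name_alt name
instance (name : String) (out : String) : Decidable (Spec_python_name name out) := by unfold Spec_python_name; infer_instance

-- ===== CLAIM (what is proved, stated in full; the proofs are below) =====
def Claim_equal_python_name : Prop := ∀ (name : String), Dom_python_name name → Spec_python_name name (python_name name)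

-- ===== LEMMAS AND PROOFS =====

-- a simple structural model of str.replace (for nonempty pattern)
def repF (old new : List Char) : List Char → List Char
  | [] => []
  | a :: t =>
    if old.isPrefixOf (a :: t) then new ++ repF old new (t.drop (old.length - 1))
    else a :: repF old new t
termination_by l => l.length
decreasing_by
· simp only [List.length_drop, List.length_cons]; omega
· simp

theorem repF_nil (old new : List Char) : repF old new [] = [] := by simp [repF]

theorem repF_cons_ne (c a : Char) (cr v t : List Char) (h : c ≠ a) :
    repF (c :: cr) v (a :: t) = a :: repF (c :: cr) v t := by
  rw [repF]
  simp [List.isPrefixOf, h]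

theorem repF_single_eq (c : Char) (v t : List Char) :
    repF [c] v (c :: t) = v ++ repF [c] v t := by
  rw [repF]; simp [List.isPrefixOf]

theorem repF_pair (c d : Char) (v t : List Char) :
    repF [c, d] v (c :: d :: t) = v ++ repF [c, d] v t := by
  rw [repF]; simp [List.isPrefixOf]

theorem repF_pair_ne2 (c d b : Char) (v t : List Char) (h : d ≠ b) :
    repF [c, d] v (c :: b :: t) = c :: repF [c, d] v (b :: t) := by
  rw [repF]
  simp [List.isPrefixOf, h]

theorem repF_pair_single (c d : Char) (v : List Char) :
    repF [c, d] v [c] = [c] := by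
  rw [repF]; simp [List.isPrefixOf, repF_nil]

theorem go_eq_repF (old new : List Char) (hold : old ≠ []) :
    ∀ (fuel : Nat) (l acc : List Char), l.length ≤ fuel →
      PySem.Chars.replace.go old new fuel l acc = acc.reverse ++ repF old new l := by
  intro fuel
  induction fuel with
  | zero =>
    intro l acc hl
    have : l = [] := by cases l <;> simp_all
    subst this
    rw [PySem.Chars.replace.go.eq_1, repF_nil]
  | succ n ih =>
    intro l acc hl
    cases l with
    | nil => rw [PySem.Chars.replace.go.eq_2 _ _ _ _ (by omega), repF_nil]; simp
    | cons a t =>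
      rw [PySem.Chars.replace.go.eq_3, repF]
      by_cases hp : old.isPrefixOf (a :: t)
      · simp only [hp, if_pos]
        have hlen : 1 ≤ old.length := by cases old <;> simp_all
        have hdrop : List.drop old.length (a :: t) = t.drop (old.length - 1) := by
          cases old with
          | nil => simp_all
          | cons o os => simp
        rw [hdrop, ih _ _ (by simp at hl ⊢; omega)]
        simp
      · simp only [hp, Bool.false_eq_true, if_neg, not_false_iff]
        rw [ih _ _ (by simp at hl; omega)]
        simp

theorem replace_eq_repF (s old new : List Char) (hold : old ≠ []) :
    PySem.Chars.replace s old new = repF old new s := by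
  rw [PySem.Chars.replace]
  have he : old.isEmpty = false := by cases old <;> simp_all
  rw [he]
  simp only [Bool.false_eq_true, if_neg, not_false_iff]
  rw [go_eq_repF old new hold s.length s [] le_rfl]
  simp

-- A's first three passes (the single-character maps for - * +)
def M (cs : List Char) : List Char :=
  repF ['+'] ['X'] (repF ['*'] ['O'] (repF ['-'] ['_'] cs))

-- A's remaining seven passes
def Cc (cs : List Char) : List Char :=
  repF ['~'] ['t','i','l','d','e'] (repF ['='] ['s','i','m'] (repF ['>'] ['g','t']
    (repF ['>','='] ['g','e'] (repF ['/','='] ['n','e'] (repF ['<'] ['l','t']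
      (repF ['<','='] ['l','e'] cs))))))

def pvSubst0 (a : Char) : List Char :=
  if a = '-' then ['_'] else if a = '*' then ['O'] else if a = '+' then ['X'] else [a]

theorem M_nil : M [] = [] := by simp [M, repF_nil]

theorem M_cons (a : Char) (t : List Char) : M (a :: t) = pvSubst0 a ++ M t := by
  unfold M pvSubst0
  by_cases h1 : a = '-'
  · subst h1
    rw [repF_single_eq]
    simp only [List.cons_append, List.nil_append]
    rw [repF_cons_ne _ _ _ _ _ (by decide), repF_cons_ne _ _ _ _ _ (by decide)]
    simp
  · rw [repF_cons_ne _ _ _ _ _ (Ne.symm h1)]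
    by_cases h2 : a = '*'
    · subst h2
      rw [repF_single_eq]
      simp only [List.cons_append, List.nil_append]
      rw [repF_cons_ne _ _ _ _ _ (by decide)]
      simp
    · rw [repF_cons_ne _ _ _ _ _ (Ne.symm h2)]
      by_cases h3 : a = '+'
      · subst h3; rw [repF_single_eq]; simp
      · rw [repF_cons_ne _ _ _ _ _ (Ne.symm h3)]; simp [h1, h2, h3]

theorem Cc_nil : Cc [] = [] := by simp [Cc, repF_nil]

theorem Cc_pass (a : Char) (X : List Char) (h1 : a ≠ '<') (h2 : a ≠ '/') (h3 : a ≠ '>')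
    (h4 : a ≠ '=') (h5 : a ≠ '~') : Cc (a :: X) = a :: Cc X := by
  unfold Cc
  rw [repF_cons_ne _ _ _ _ _ (Ne.symm h1), repF_cons_ne _ _ _ _ _ (Ne.symm h1),
      repF_cons_ne _ _ _ _ _ (Ne.symm h2), repF_cons_ne _ _ _ _ _ (Ne.symm h3),
      repF_cons_ne _ _ _ _ _ (Ne.symm h3), repF_cons_ne _ _ _ _ _ (Ne.symm h4),
      repF_cons_ne _ _ _ _ _ (Ne.symm h5)]

theorem Cc_tilde (X : List Char) : Cc ('~' :: X) = 't' :: 'i' :: 'l' :: 'd' :: 'e' :: Cc X := by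
  unfold Cc
  rw [repF_cons_ne _ _ _ _ _ (by decide), repF_cons_ne _ _ _ _ _ (by decide),
      repF_cons_ne _ _ _ _ _ (by decide), repF_cons_ne _ _ _ _ _ (by decide),
      repF_cons_ne _ _ _ _ _ (by decide), repF_cons_ne _ _ _ _ _ (by decide),
      repF_single_eq]
  simp

theorem Cc_sim (X : List Char) : Cc ('=' :: X) = 's' :: 'i' :: 'm' :: Cc X := by
  unfold Cc
  rw [repF_cons_ne _ _ _ _ _ (by decide), repF_cons_ne _ _ _ _ _ (by decide),
      repF_cons_ne _ _ _ _ _ (by decide), repF_cons_ne _ _ _ _ _ (by decide),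
      repF_cons_ne _ _ _ _ _ (by decide), repF_single_eq]
  simp only [List.cons_append, List.nil_append]
  rw [repF_cons_ne _ _ _ _ _ (by decide), repF_cons_ne _ _ _ _ _ (by decide),
      repF_cons_ne _ _ _ _ _ (by decide)]

theorem Cc_le (X : List Char) : Cc ('<' :: '=' :: X) = 'l' :: 'e' :: Cc X := by
  unfold Cc
  rw [repF_pair]
  simp only [List.cons_append, List.nil_append]
  rw [repF_cons_ne _ _ _ _ _ (by decide), repF_cons_ne _ _ _ _ _ (by decide),
      repF_cons_ne _ _ _ _ _ (by decide), repF_cons_ne _ _ _ _ _ (by decide),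
      repF_cons_ne _ _ _ _ _ (by decide), repF_cons_ne _ _ _ _ _ (by decide),
      repF_cons_ne _ _ _ _ _ (by decide), repF_cons_ne _ _ _ _ _ (by decide),
      repF_cons_ne _ _ _ _ _ (by decide), repF_cons_ne _ _ _ _ _ (by decide),
      repF_cons_ne _ _ _ _ _ (by decide), repF_cons_ne _ _ _ _ _ (by decide)]

theorem Cc_lt_none (X : List Char) (h : X.head? ≠ some '=') :
    Cc ('<' :: X) = 'l' :: 't' :: Cc X := by
  unfold Cc
  have h4 : repF ['<','='] ['l','e'] ('<' :: X) = '<' :: repF ['<','='] ['l','e'] X := by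
    cases X with
    | nil => rw [repF_pair_single, repF_nil]
    | cons z zs =>
      have hz : z ≠ '=' := by simpa using fun e => h (by simp [e])
      exact repF_pair_ne2 _ _ _ _ _ (fun e => hz e.symm)
  rw [h4, repF_single_eq]
  simp only [List.cons_append, List.nil_append]
  rw [repF_cons_ne _ _ _ _ _ (by decide), repF_cons_ne _ _ _ _ _ (by decide),
      repF_cons_ne _ _ _ _ _ (by decide), repF_cons_ne _ _ _ _ _ (by decide),
      repF_cons_ne _ _ _ _ _ (by decide), repF_cons_ne _ _ _ _ _ (by decide),
      repF_cons_ne _ _ _ _ _ (by decide), repF_cons_ne _ _ _ _ _ (by decide),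
      repF_cons_ne _ _ _ _ _ (by decide), repF_cons_ne _ _ _ _ _ (by decide)]

-- heads are preserved (never '=') through the early passes
theorem head4 (X : List Char) (h : X.head? ≠ some '=') :
    (repF ['<','='] ['l','e'] X).head? ≠ some '=' := by
  cases X with
  | nil => simp [repF_nil]
  | cons a t =>
    by_cases ha : a = '<'
    · subst ha
      cases t with
      | nil => rw [repF_pair_single]; simp
      | cons z zs =>
        by_cases hz : z = '='
        · subst hz; rw [repF_pair]; simp
        · rw [repF_pair_ne2 _ _ _ _ _ (fun hh => hz hh.symm)]; simp
    · rw [repF_cons_ne _ _ _ _ _ (fun hh => ha hh.symm)]; simpa using h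

theorem head5 (X : List Char) (h : X.head? ≠ some '=') :
    (repF ['<'] ['l','t'] X).head? ≠ some '=' := by
  cases X with
  | nil => simp [repF_nil]
  | cons a t =>
    by_cases ha : a = '<'
    · subst ha; rw [repF_single_eq]; simp
    · rw [repF_cons_ne _ _ _ _ _ (fun hh => ha hh.symm)]; simpa using h

theorem head6 (X : List Char) (h : X.head? ≠ some '=') :
    (repF ['/','='] ['n','e'] X).head? ≠ some '=' := by
  cases X with
  | nil => simp [repF_nil]
  | cons a t =>
    by_cases ha : a = '/'
    · subst ha
      cases t with
      | nil => rw [repF_pair_single]; simp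
      | cons z zs =>
        by_cases hz : z = '='
        · subst hz; rw [repF_pair]; simp
        · rw [repF_pair_ne2 _ _ _ _ _ (fun hh => hz hh.symm)]; simp
    · rw [repF_cons_ne _ _ _ _ _ (fun hh => ha hh.symm)]; simpa using h

theorem Cc_ne_div (X : List Char) : Cc ('/' :: '=' :: X) = 'n' :: 'e' :: Cc X := by
  unfold Cc
  rw [repF_cons_ne '<' '/' ['='] ['l','e'] _ (by decide),
      repF_cons_ne '<' '=' ['='] ['l','e'] _ (by decide),
      repF_cons_ne '<' '/' [] ['l','t'] _ (by decide),
      repF_cons_ne '<' '=' [] ['l','t'] _ (by decide),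
      repF_pair '/' '=' ['n','e'] _]
  simp only [List.cons_append, List.nil_append]
  rw [repF_cons_ne '>' 'n' ['='] ['g','e'] _ (by decide),
      repF_cons_ne '>' 'e' ['='] ['g','e'] _ (by decide),
      repF_cons_ne '>' 'n' [] ['g','t'] _ (by decide),
      repF_cons_ne '>' 'e' [] ['g','t'] _ (by decide),
      repF_cons_ne '=' 'n' [] ['s','i','m'] _ (by decide),
      repF_cons_ne '=' 'e' [] ['s','i','m'] _ (by decide),
      repF_cons_ne '~' 'n' [] ['t','i','l','d','e'] _ (by decide),
      repF_cons_ne '~' 'e' [] ['t','i','l','d','e'] _ (by decide)]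

theorem Cc_div_none (X : List Char) (h : X.head? ≠ some '=') :
    Cc ('/' :: X) = '/' :: Cc X := by
  unfold Cc
  rw [repF_cons_ne _ _ _ _ _ (by decide), repF_cons_ne _ _ _ _ _ (by decide)]
  have hh : (repF ['<'] ['l','t'] (repF ['<','='] ['l','e'] X)).head? ≠ some '=' :=
    head5 _ (head4 _ h)
  have h6 : repF ['/','='] ['n','e'] ('/' :: repF ['<'] ['l','t'] (repF ['<','='] ['l','e'] X))
      = '/' :: repF ['/','='] ['n','e'] (repF ['<'] ['l','t'] (repF ['<','='] ['l','e'] X)) := by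
    cases hc : (repF ['<'] ['l','t'] (repF ['<','='] ['l','e'] X)) with
    | nil => rw [repF_pair_single, repF_nil]
    | cons z zs =>
      have hz : z ≠ '=' := by rw [hc] at hh; simpa using hh
      exact repF_pair_ne2 _ _ _ _ _ (fun e => hz e.symm)
  rw [h6,
      repF_cons_ne _ _ _ _ _ (by decide), repF_cons_ne _ _ _ _ _ (by decide),
      repF_cons_ne _ _ _ _ _ (by decide), repF_cons_ne _ _ _ _ _ (by decide)]

theorem Cc_ge (X : List Char) : Cc ('>' :: '=' :: X) = 'g' :: 'e' :: Cc X := by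
  unfold Cc
  rw [repF_cons_ne '<' '>' ['='] ['l','e'] _ (by decide),
      repF_cons_ne '<' '=' ['='] ['l','e'] _ (by decide),
      repF_cons_ne '<' '>' [] ['l','t'] _ (by decide),
      repF_cons_ne '<' '=' [] ['l','t'] _ (by decide),
      repF_cons_ne '/' '>' ['='] ['n','e'] _ (by decide),
      repF_cons_ne '/' '=' ['='] ['n','e'] _ (by decide),
      repF_pair '>' '=' ['g','e'] _]
  simp only [List.cons_append, List.nil_append]
  rw [repF_cons_ne '>' 'g' [] ['g','t'] _ (by decide),
      repF_cons_ne '>' 'e' [] ['g','t'] _ (by decide),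
      repF_cons_ne '=' 'g' [] ['s','i','m'] _ (by decide),
      repF_cons_ne '=' 'e' [] ['s','i','m'] _ (by decide),
      repF_cons_ne '~' 'g' [] ['t','i','l','d','e'] _ (by decide),
      repF_cons_ne '~' 'e' [] ['t','i','l','d','e'] _ (by decide)]

theorem Cc_gt_none (X : List Char) (h : X.head? ≠ some '=') :
    Cc ('>' :: X) = 'g' :: 't' :: Cc X := by
  unfold Cc
  rw [repF_cons_ne '<' '>' ['='] ['l','e'] _ (by decide),
      repF_cons_ne '<' '>' [] ['l','t'] _ (by decide),
      repF_cons_ne '/' '>' ['='] ['n','e'] _ (by decide)]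
  have hh : (repF ['/','='] ['n','e'] (repF ['<'] ['l','t'] (repF ['<','='] ['l','e'] X))).head?
      ≠ some '=' := head6 _ (head5 _ (head4 _ h))
  have h7 : repF ['>','='] ['g','e']
        ('>' :: repF ['/','='] ['n','e'] (repF ['<'] ['l','t'] (repF ['<','='] ['l','e'] X)))
      = '>' :: repF ['>','='] ['g','e']
        (repF ['/','='] ['n','e'] (repF ['<'] ['l','t'] (repF ['<','='] ['l','e'] X))) := by
    cases hc : repF ['/','='] ['n','e'] (repF ['<'] ['l','t'] (repF ['<','='] ['l','e'] X)) with
    | nil => rw [repF_pair_single, repF_nil]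
    | cons z zs =>
      have hz : z ≠ '=' := by rw [hc] at hh; simpa using hh
      exact repF_pair_ne2 _ _ _ _ _ (fun e => hz e.symm)
  rw [h7, repF_single_eq]
  simp only [List.cons_append, List.nil_append]
  rw [repF_cons_ne '=' 'g' [] ['s','i','m'] _ (by decide),
      repF_cons_ne '=' 't' [] ['s','i','m'] _ (by decide),
      repF_cons_ne '~' 'g' [] ['t','i','l','d','e'] _ (by decide),
      repF_cons_ne '~' 't' [] ['t','i','l','d','e'] _ (by decide)]

theorem head_M (t : List Char) : (M t).head? ≠ some '=' ∨ ∃ rest, t = '=' :: rest := by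
  cases t with
  | nil => left; simp [M_nil]
  | cons b rest =>
    by_cases hb : b = '='
    · right; exact ⟨rest, by rw [hb]⟩
    · left
      rw [M_cons]
      unfold pvSubst0
      split_ifs with e1 e2 e3 <;> simp_all

theorem pvSubst2_none (a b : Char) (h1 : a ≠ '<') (h2 : a ≠ '/') (h3 : a ≠ '>') :
    pvSubst2 a b = none := by
  unfold pvSubst2
  split_ifs with e1 e2 e3 <;> simp_all

-- the crux: A's ten sequential passes equal B's single scan, on every list
theorem scan_eq : ∀ (n : Nat) (cs : List Char), cs.length ≤ n → Cc (M cs) = pvScan cs := by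
  intro n
  induction n with
  | zero =>
    intro cs h
    have : cs = [] := by cases cs <;> simp_all
    subst this
    rw [M_nil, Cc_nil]; simp [pvScan]
  | succ n ih =>
    intro cs hlen
    cases cs with
    | nil => rw [M_nil, Cc_nil]; simp [pvScan]
    | cons a t =>
      have ht : t.length ≤ n := by simp at hlen; omega
      rw [M_cons]
      by_cases ha1 : a = '<'
      · subst ha1
        rw [show pvSubst0 '<' = ['<'] from rfl]
        rcases t with _ | ⟨b, rest⟩
        · rw [M_nil, List.append_nil, Cc_lt_none [] (by simp), Cc_nil]
          simp [pvScan, pvSubst1]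
        · by_cases hb : b = '='
          · subst hb
            rw [M_cons, show pvSubst0 '=' = ['='] from rfl,
                show (['<'] ++ (['='] ++ M rest) : List Char) = '<' :: '=' :: M rest from rfl,
                Cc_le, ih rest (by simp at ht; omega)]
            simp [pvScan, pvSubst2]
          · have hne : (M (b :: rest)).head? ≠ some '=' := by
              rcases head_M (b :: rest) with h | ⟨r, hr⟩
              · exact h
              · exact absurd (List.cons.inj hr).1 hb
            rw [show (['<'] ++ M (b :: rest) : List Char) = '<' :: M (b :: rest) from rfl,
                Cc_lt_none _ hne, ih (b :: rest) ht]
            simp [pvScan, pvSubst2, pvSubst1, hb]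
      · by_cases ha2 : a = '/'
        · subst ha2
          rw [show pvSubst0 '/' = ['/'] from rfl]
          rcases t with _ | ⟨b, rest⟩
          · rw [M_nil, List.append_nil, Cc_div_none [] (by simp), Cc_nil]
            simp [pvScan, pvSubst1]
          · by_cases hb : b = '='
            · subst hb
              rw [M_cons, show pvSubst0 '=' = ['='] from rfl,
                  show (['/'] ++ (['='] ++ M rest) : List Char) = '/' :: '=' :: M rest from rfl,
                  Cc_ne_div, ih rest (by simp at ht; omega)]
              simp [pvScan, pvSubst2]
            · have hne : (M (b :: rest)).head? ≠ some '=' := by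
                rcases head_M (b :: rest) with h | ⟨r, hr⟩
                · exact h
                · exact absurd (List.cons.inj hr).1 hb
              rw [show (['/'] ++ M (b :: rest) : List Char) = '/' :: M (b :: rest) from rfl,
                  Cc_div_none _ hne, ih (b :: rest) ht]
              simp [pvScan, pvSubst2, pvSubst1, hb]
        · by_cases ha3 : a = '>'
          · subst ha3
            rw [show pvSubst0 '>' = ['>'] from rfl]
            rcases t with _ | ⟨b, rest⟩
            · rw [M_nil, List.append_nil, Cc_gt_none [] (by simp), Cc_nil]
              simp [pvScan, pvSubst1]
            · by_cases hb : b = '='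
              · subst hb
                rw [M_cons, show pvSubst0 '=' = ['='] from rfl,
                    show (['>'] ++ (['='] ++ M rest) : List Char) = '>' :: '=' :: M rest from rfl,
                    Cc_ge, ih rest (by simp at ht; omega)]
                simp [pvScan, pvSubst2]
              · have hne : (M (b :: rest)).head? ≠ some '=' := by
                  rcases head_M (b :: rest) with h | ⟨r, hr⟩
                  · exact h
                  · exact absurd (List.cons.inj hr).1 hb
                rw [show (['>'] ++ M (b :: rest) : List Char) = '>' :: M (b :: rest) from rfl,
                    Cc_gt_none _ hne, ih (b :: rest) ht]
                simp [pvScan, pvSubst2, pvSubst1, hb]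
          · by_cases ha4 : a = '='
            · subst ha4
              rw [show pvSubst0 '=' = ['='] from rfl,
                  show (['='] ++ M t : List Char) = '=' :: M t from rfl, Cc_sim, ih t ht]
              cases t <;> simp [pvScan, pvSubst2, pvSubst1]
            · by_cases ha5 : a = '~'
              · subst ha5
                rw [show pvSubst0 '~' = ['~'] from rfl,
                    show (['~'] ++ M t : List Char) = '~' :: M t from rfl, Cc_tilde, ih t ht]
                cases t <;> simp [pvScan, pvSubst2, pvSubst1]
              · -- a is none of the seven special characters' starts for Cc
                have hscan : pvScan (a :: t) = pvSubst1 a ++ pvScan t := by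
                  cases t with
                  | nil => simp [pvScan]
                  | cons b rest =>
                    simp [pvScan, pvSubst2_none a b ha1 ha2 ha3]
                by_cases hm1 : a = '-'
                · subst hm1
                  rw [show pvSubst0 '-' = ['_'] from rfl,
                      show (['_'] ++ M t : List Char) = '_' :: M t from rfl,
                      Cc_pass '_' _ (by decide) (by decide) (by decide) (by decide) (by decide),
                      ih t ht, hscan]
                  simp [pvSubst1]
                · by_cases hm2 : a = '*'
                  · subst hm2
                    rw [show pvSubst0 '*' = ['O'] from rfl,
                        show (['O'] ++ M t : List Char) = 'O' :: M t from rfl,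
                        Cc_pass 'O' _ (by decide) (by decide) (by decide) (by decide) (by decide),
                        ih t ht, hscan]
                    simp [pvSubst1]
                  · by_cases hm3 : a = '+'
                    · subst hm3
                      rw [show pvSubst0 '+' = ['X'] from rfl,
                          show (['X'] ++ M t : List Char) = 'X' :: M t from rfl,
                          Cc_pass 'X' _ (by decide) (by decide) (by decide) (by decide) (by decide),
                          ih t ht, hscan]
                      simp [pvSubst1]
                    · have h0 : pvSubst0 a = [a] := by simp [pvSubst0, hm1, hm2, hm3]
                      rw [h0, show ([a] ++ M t : List Char) = a :: M t from rfl,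
                          Cc_pass a _ ha1 ha2 ha3 ha4 ha5, ih t ht, hscan]
                      simp [pvSubst1, hm1, hm2, hm3, ha1, ha3, ha4, ha5]

-- connect port A's replace chain to Cc ∘ M
theorem chain_eq (cs : List Char) :
    PySem.Chars.replace (PySem.Chars.replace (PySem.Chars.replace (PySem.Chars.replace
      (PySem.Chars.replace (PySem.Chars.replace (PySem.Chars.replace (PySem.Chars.replace
        (PySem.Chars.replace (PySem.Chars.replace cs ['-'] ['_']) ['*'] ['O']) ['+'] ['X'])
        ['<','='] ['l','e']) ['<'] ['l','t']) ['/','='] ['n','e']) ['>','='] ['g','e'])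
        ['>'] ['g','t']) ['='] ['s','i','m']) ['~'] ['t','i','l','d','e'] = Cc (M cs) := by
  rw [replace_eq_repF _ _ _ (by simp), replace_eq_repF _ _ _ (by simp),
      replace_eq_repF _ _ _ (by simp), replace_eq_repF _ _ _ (by simp),
      replace_eq_repF _ _ _ (by simp), replace_eq_repF _ _ _ (by simp),
      replace_eq_repF _ _ _ (by simp), replace_eq_repF _ _ _ (by simp),
      replace_eq_repF _ _ _ (by simp), replace_eq_repF _ _ _ (by simp)]
  rfl

-- ===== VERDICT (by name: the statement is the Claim_ definition above) =====
theorem python_name_spec : Claim_equal_python_name := by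
  intro name _
  unfold Spec_python_name python_name python_name_alt
  cases h : pvTranslations.get? name with
  | some v => rfl
  | none =>
    simp only []
    rw [chain_eq, scan_eq _ _ le_rfl]
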